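-- pv_equiv track=rewrite | github.com/bbbjason/gomoku-ai | gomoku.py | shift_board
-- ===== SOURCE A (Python) =====
-- def create_board(size):
--     return [['-' for _ in range(size)] for _ in range(size)]
--
-- def shift_board(board, row, col, margin=2):
--     """
--     將 board 整體平移，使 (row,col) 至少距離邊界 margin。
--     回傳新的 board，以及更新後的 row, col。
--     """
--     size = len(board)
--     # 計算需要往哪個方向、多少格平移
--     shift_r = 0
--     shift_c = 0
--     if row < margin:
--         shift_r = margin - row
--     elif row >= size - margin:
--         shift_r = (size - margin - 1) - row
--
--     if col < margin:
--         shift_c = margin - col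
--     elif col >= size - margin:
--         shift_c = (size - margin - 1) - col
--
--     # 如果不需要平移，直接回傳原值
--     if shift_r == 0 and shift_c == 0:
--         return board, row, col
--
--     # 建立同尺寸的新棋盤，默認全空
--     new_board = create_board(size)
--     for i in range(size):
--         for j in range(size):
--             ni = i + shift_r
--             nj = j + shift_c
--             if 0 <= ni < size and 0 <= nj < size:
--                 new_board[ni][nj] = board[i][j]
--
--     # 更新落子座標
--     new_row = row + shift_r
--     new_col = col + shift_c
--     return new_board, new_row, new_col
-- ===== SOURCE B (Python) =====
-- def shift_board(board, row, col, margin=2):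
--     """Row-wise rebuild: pick/blank whole rows, shift each row by slicing+padding."""
--     size = len(board)
--     shift_r = 0
--     shift_c = 0
--     if row < margin:
--         shift_r = margin - row
--     elif row >= size - margin:
--         shift_r = (size - margin - 1) - row
--     if col < margin:
--         shift_c = margin - col
--     elif col >= size - margin:
--         shift_c = (size - margin - 1) - col
--
--     if shift_r == 0 and shift_c == 0:
--         return board, row, col
--
--     def shifted_row(src):
--         if shift_c >= 0:
--             k = min(shift_c, size)
--             return ['-'] * k + src[0:size - k]
--         k = min(-shift_c, size)
--         return src[k:size] + ['-'] * k
--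
--     new_board = []
--     for ni in range(size):
--         si = ni - shift_r
--         if 0 <= si < size:
--             new_board.append(shifted_row(board[si]))
--         else:
--             new_board.append(['-'] * size)
--     return new_board, row + shift_r, col + shift_c
-- ===== Notes on version B (the rewrite author's own statement) =====
-- stated objective: simpler
-- what changed: A fills a fresh size x size board cell by cell with a nested loop and per-cell bounds checks; B builds the new board row by row, selecting or blanking whole rows for the vertical shift and producing each row by one slice plus '-' padding for the horizontal shift.
import Mathlib
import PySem

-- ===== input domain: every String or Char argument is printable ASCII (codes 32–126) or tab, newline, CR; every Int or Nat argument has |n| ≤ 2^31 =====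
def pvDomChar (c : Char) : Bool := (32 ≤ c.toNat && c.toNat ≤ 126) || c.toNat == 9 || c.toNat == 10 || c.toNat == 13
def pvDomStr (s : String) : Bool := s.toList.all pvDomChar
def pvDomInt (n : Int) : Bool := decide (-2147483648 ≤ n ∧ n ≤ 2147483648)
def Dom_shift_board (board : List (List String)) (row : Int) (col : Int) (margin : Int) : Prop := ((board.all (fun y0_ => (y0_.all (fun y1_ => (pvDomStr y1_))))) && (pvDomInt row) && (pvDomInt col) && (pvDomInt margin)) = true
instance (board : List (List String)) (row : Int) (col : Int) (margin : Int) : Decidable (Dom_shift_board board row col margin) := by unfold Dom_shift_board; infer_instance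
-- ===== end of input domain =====

-- B rebuilds the shifted board row by row (whole-row blanking plus per-row slice-and-pad)
-- instead of A's cell-by-cell nested write loop; objective: simpler. Return values only
-- (neither program mutates its arguments; the no-shift branch returns the input board).

-- the shift amount for one coordinate (the identical if/elif chain appears in both Pythons)
def pvShift (p size margin : Int) : Int :=
  if p < margin then margin - p
  else if p ≥ size - margin then (size - margin - 1) - p
  else 0

-- ===== PORT A =====
def shift_board (board : List (List String)) (row : Int) (col : Int) (margin : Int) : List (List String) × Int × Int :=
  let size : Int := board.length
  let shift_r := pvShift row size margin
  let shift_c := pvShift col size margin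
  if shift_r = 0 ∧ shift_c = 0 then (board, row, col)
  else
    -- create_board(size), then the nested loop doing new_board[ni][nj] = board[i][j]
    let new_board :=
      (PySem.List.pyRange 0 size 1).foldl (fun nb i =>
        (PySem.List.pyRange 0 size 1).foldl (fun nb j =>
          if 0 ≤ i + shift_r ∧ i + shift_r < size ∧ 0 ≤ j + shift_c ∧ j + shift_c < size then
            nb.modify (i + shift_r).toNat (fun r =>
              r.set (j + shift_c).toNat (PySem.List.pyGetD (PySem.List.pyGetD board i []) j "-"))
          else nb) nb)
        (List.replicate size.toNat (List.replicate size.toNat "-"))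
    (new_board, row + shift_r, col + shift_c)

-- ===== PORT B =====
def shift_board_alt (board : List (List String)) (row : Int) (col : Int) (margin : Int) : List (List String) × Int × Int :=
  let size : Int := board.length
  let shift_r := pvShift row size margin
  let shift_c := pvShift col size margin
  if shift_r = 0 ∧ shift_c = 0 then (board, row, col)
  else
    -- build the new board row by row: blank rows outside the image, slice-and-pad inside
    let new_board :=
      (PySem.List.pyRange 0 size 1).map (fun ni =>
        if 0 ≤ ni - shift_r ∧ ni - shift_r < size then
          (if 0 ≤ shift_c then
            List.replicate (min shift_c size).toNat "-" ++
              PySem.List.slice (PySem.List.pyGetD board (ni - shift_r) [])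
                (some 0) (some (size - min shift_c size))
          else
            PySem.List.slice (PySem.List.pyGetD board (ni - shift_r) [])
              (some (min (-shift_c) size)) (some size) ++
              List.replicate (min (-shift_c) size).toNat "-")
        else List.replicate size.toNat "-")
    (new_board, row + shift_r, col + shift_c)

-- ===== PRECONDITION & SPEC =====
-- Pre_ excludes exactly the inputs on which A raises IndexError: when a shift is needed,
-- every row whose shifted image lands on the board must contain all the cells A reads from
-- it (ragged too-short rows are excluded; when no shift is needed nothing is read).
def Pre_shift_board (board : List (List String)) (row : Int) (col : Int) (margin : Int) : Prop :=
  (pvShift row (board.length : Int) margin = 0 ∧ pvShift col (board.length : Int) margin = 0) ∨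
    ∀ i ∈ List.range board.length,
      (0 ≤ (i : Int) + pvShift row (board.length : Int) margin ∧
        (i : Int) + pvShift row (board.length : Int) margin < (board.length : Int)) →
        (if 0 ≤ pvShift col (board.length : Int) margin
         then (board.length : Int) - pvShift col (board.length : Int) margin
         else if -pvShift col (board.length : Int) margin < (board.length : Int)
           then (board.length : Int) else 0) ≤ ((board.getD i []).length : Int)
instance (board : List (List String)) (row : Int) (col : Int) (margin : Int) : Decidable (Pre_shift_board board row col margin) := by unfold Pre_shift_board; infer_instance

def pvWitness_shift_board : List (List String) × Int × Int × Int :=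
  ([["-", "-", "-"], ["-", "X", "-"], ["-", "-", "-"]], 0, 0, 1)

def Spec_shift_board (board : List (List String)) (row : Int) (col : Int) (margin : Int) (out : List (List String) × Int × Int) : Prop := out = shift_board_alt board row col margin
instance (board : List (List String)) (row : Int) (col : Int) (margin : Int) (out : List (List String) × Int × Int) : Decidable (Spec_shift_board board row col margin out) := by unfold Spec_shift_board; infer_instance

-- ===== CLAIM (what is proved, stated in full; the proofs are below) =====
def Claim_equal_shift_board : Prop := ∀ (board : List (List String)) (row : Int) (col : Int) (margin : Int), Dom_shift_board board row col margin → Pre_shift_board board row col margin → Spec_shift_board board row col margin (shift_board board row col margin)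

-- ===== LEMMAS AND PROOFS =====

theorem pv_hoist {α : Type} (P : Prop) [Decidable P] (k : Nat) (Q : Int → Prop)
    [DecidablePred Q] (g : Int → α → α) :
    ∀ (l : List Int) (acc : List α),
      (l.foldl (fun a j => if P ∧ Q j then a.modify k (g j) else a) acc)
        = if P then acc.modify k (fun r => l.foldl (fun r j => if Q j then g j r else r) r)
          else acc := by
  intro l
  induction l with
  | nil =>
    intro acc
    simp only [List.foldl_nil]
    split_ifs
    · rw [show (fun (r : α) => r) = @id α from rfl, List.modify_id]
    · rfl
  | cons j t ih =>
    intro acc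
    rw [List.foldl_cons]
    by_cases hP : P
    · by_cases hQ : Q j
      · rw [if_pos (show P ∧ Q j from ⟨hP, hQ⟩), ih, if_pos hP, if_pos hP,
          List.modify_modify_eq]
        congr 1
        funext r0
        simp only [Function.comp_apply]
        rw [List.foldl_cons, if_pos hQ]
      · rw [if_neg (show ¬(P ∧ Q j) by tauto), ih, if_pos hP, if_pos hP]
        congr 1
        funext r0
        rw [List.foldl_cons, if_neg hQ]
    · rw [if_neg (show ¬(P ∧ Q j) by tauto), ih, if_neg hP, if_neg hP]

theorem pv_foldl_gmod_get {α : Type} (s sz : Int) (u : Int → α → α) :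
    ∀ (l : List Int), l.Nodup → ∀ (acc : List α) (r : Nat),
      ((l.foldl (fun a i =>
          if 0 ≤ i + s ∧ i + s < sz then a.modify (i + s).toNat (u i) else a) acc)[r]?)
        = if ((r : Int) - s) ∈ l ∧ (r : Int) < sz then (acc[r]?).map (u ((r : Int) - s))
          else acc[r]? := by
  intro l
  induction l with
  | nil => intro _ acc r; simp
  | cons i t ih =>
    intro hnd acc r
    have hnd' := hnd.of_cons
    have hnotmem : i ∉ t := (List.nodup_cons.mp hnd).1
    rw [List.foldl_cons]
    by_cases hi : (i : Int) = (r : Int) - s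
    · have ht : ((r : Int) - s) ∉ t := hi ▸ hnotmem
      by_cases hr : (r : Int) < sz
      · have hg : (0 ≤ i + s ∧ i + s < sz) := by omega
        rw [if_pos hg, ih hnd' _ r, if_neg (by simp [ht]),
          if_pos ⟨by rw [← hi]; exact List.mem_cons_self, hr⟩]
        have hk : (i + s).toNat = r := by omega
        rw [hk, List.getElem?_modify]
        cases acc[r]? with
        | none => rfl
        | some a => simp [hi]
      · have hg : ¬(0 ≤ i + s ∧ i + s < sz) := by omega
        rw [if_neg hg, ih hnd' _ r, if_neg (by simp [ht]), if_neg (by simp [hr])]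
    · by_cases hg : (0 ≤ i + s ∧ i + s < sz)
      · have hne : (i + s).toNat ≠ r := by omega
        rw [if_pos hg, ih hnd' _ r]
        have hmz : (((r : Int) - s ∈ i :: t) ∧ (r : Int) < sz)
            ↔ (((r : Int) - s ∈ t) ∧ (r : Int) < sz) := by
          rw [List.mem_cons, or_iff_right (fun h => hi h.symm)]
        rw [if_congr hmz rfl rfl]
        split_ifs with h
        · rw [List.getElem?_modify]
          cases acc[r]? with
          | none => rfl
          | some a => simp [hne]
        · rw [List.getElem?_modify]
          cases acc[r]? with
          | none => rfl
          | some a => simp [hne]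
      · rw [if_neg hg, ih hnd' _ r]
        have hmz : (((r : Int) - s ∈ i :: t) ∧ (r : Int) < sz)
            ↔ (((r : Int) - s ∈ t) ∧ (r : Int) < sz) := by
          rw [List.mem_cons, or_iff_right (fun h => hi h.symm)]
        rw [if_congr hmz rfl rfl]


theorem pv_row_eq (sz sc : Int) (hsz : 0 ≤ sz) (src : List String)
    (hlen : (if 0 ≤ sc then sz - sc else if -sc < sz then sz else 0) ≤ (src.length : Int)) :
    ((PySem.List.pyRange 0 sz 1).foldl (fun r j =>
        if 0 ≤ j + sc ∧ j + sc < sz then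
          r.modify (j + sc).toNat (fun _ => PySem.List.pyGetD src j "-") else r)
      (List.replicate sz.toNat "-"))
    = (if 0 ≤ sc then
        List.replicate (min sc sz).toNat "-" ++
          PySem.List.slice src (some 0) (some (sz - min sc sz))
      else
        PySem.List.slice src (some (min (-sc) sz)) (some sz) ++
          List.replicate (min (-sc) sz).toNat "-") := by
  apply List.ext_getElem?
  intro c
  rw [pv_foldl_gmod_get sc sz _ _ (PySem.List.nodup_pyRange_one 0 sz)]
  by_cases hsc : 0 ≤ sc
  · rw [if_pos hsc] at hlen
    rw [if_pos hsc, PySem.List.slice_toNat src le_rfl (by omega)]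
    simp only [PySem.List.mem_pyRange_one, List.getElem?_append, List.getElem?_replicate,
      List.getElem?_take, List.length_replicate, Int.toNat_zero, List.drop_zero,
      Nat.sub_zero]
    split_ifs <;>
      first
      | rfl
      | (exfalso; omega)
      | (simp only [Option.map_some];
         rw [PySem.List.pyGetD_eq_getElem src "-" (by omega) (by omega),
           List.getElem?_eq_getElem (by omega)];
         simp only [show c - (min sc sz).toNat = ((c : Int) - sc).toNat from by omega])
  · rw [if_neg hsc] at hlen
    rw [if_neg hsc, PySem.List.slice_toNat src (by omega) (by omega)]
    simp only [PySem.List.mem_pyRange_one, List.getElem?_append, List.getElem?_replicate,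
      List.getElem?_take, List.getElem?_drop, List.length_take, List.length_drop]
    by_cases hscz : -sc < sz
    · rw [if_pos hscz] at hlen
      split_ifs <;>
        first
        | rfl
        | (exfalso; omega)
        | (simp only [Option.map_some];
           rw [PySem.List.pyGetD_eq_getElem src "-" (by omega) (by omega),
             List.getElem?_eq_getElem (by omega)];
           simp only [show (min (-sc) sz).toNat + c = ((c : Int) - sc).toNat from by omega])
    · rw [if_neg hscz] at hlen
      split_ifs <;>
        first
        | rfl
        | (exfalso; omega)


-- the two freshly built boards agree (A's nested write loop = B's row-by-row map)
theorem pv_board_eq (board : List (List String)) (sr sc sz : Int)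
    (hsz : sz = (board.length : Int))
    (hlen : ∀ i ∈ List.range board.length,
      (0 ≤ (i : Int) + sr ∧ (i : Int) + sr < sz) →
        (if 0 ≤ sc then sz - sc else if -sc < sz then sz else 0)
          ≤ ((board.getD i []).length : Int)) :
    ((PySem.List.pyRange 0 sz 1).foldl (fun nb i =>
      (PySem.List.pyRange 0 sz 1).foldl (fun nb j =>
        if 0 ≤ i + sr ∧ i + sr < sz ∧ 0 ≤ j + sc ∧ j + sc < sz then
          nb.modify (i + sr).toNat (fun r =>
            r.set (j + sc).toNat (PySem.List.pyGetD (PySem.List.pyGetD board i []) j "-"))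
        else nb) nb)
      (List.replicate sz.toNat (List.replicate sz.toNat "-")))
    = (PySem.List.pyRange 0 sz 1).map (fun ni =>
        if 0 ≤ ni - sr ∧ ni - sr < sz then
          (if 0 ≤ sc then
            List.replicate (min sc sz).toNat "-" ++
              PySem.List.slice (PySem.List.pyGetD board (ni - sr) [])
                (some 0) (some (sz - min sc sz))
          else
            PySem.List.slice (PySem.List.pyGetD board (ni - sr) [])
              (some (min (-sc) sz)) (some sz) ++
              List.replicate (min (-sc) sz).toNat "-")
        else List.replicate sz.toNat "-") := by
  have h1 : ((PySem.List.pyRange 0 sz 1).foldl (fun nb i =>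
      (PySem.List.pyRange 0 sz 1).foldl (fun nb j =>
        if 0 ≤ i + sr ∧ i + sr < sz ∧ 0 ≤ j + sc ∧ j + sc < sz then
          nb.modify (i + sr).toNat (fun r =>
            r.set (j + sc).toNat (PySem.List.pyGetD (PySem.List.pyGetD board i []) j "-"))
        else nb) nb)
      (List.replicate sz.toNat (List.replicate sz.toNat "-")))
      = ((PySem.List.pyRange 0 sz 1).foldl (fun nb i =>
          if 0 ≤ i + sr ∧ i + sr < sz then
            nb.modify (i + sr).toNat (fun r0 =>
              (PySem.List.pyRange 0 sz 1).foldl (fun r0 j =>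
                if 0 ≤ j + sc ∧ j + sc < sz then
                  r0.modify (j + sc).toNat
                    (fun _ => PySem.List.pyGetD (PySem.List.pyGetD board i []) j "-")
                else r0) r0)
          else nb)
        (List.replicate sz.toNat (List.replicate sz.toNat "-"))) := by
    apply PySem.List.foldl_congr_mem
    intro acc i _
    calc (PySem.List.pyRange 0 sz 1).foldl (fun nb j =>
            if 0 ≤ i + sr ∧ i + sr < sz ∧ 0 ≤ j + sc ∧ j + sc < sz then
              nb.modify (i + sr).toNat (fun r =>
                r.set (j + sc).toNat (PySem.List.pyGetD (PySem.List.pyGetD board i []) j "-"))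
            else nb) acc
        = (PySem.List.pyRange 0 sz 1).foldl (fun nb j =>
            if (0 ≤ i + sr ∧ i + sr < sz) ∧ (0 ≤ j + sc ∧ j + sc < sz) then
              nb.modify (i + sr).toNat (fun r0 =>
                r0.modify (j + sc).toNat
                  (fun _ => PySem.List.pyGetD (PySem.List.pyGetD board i []) j "-"))
            else nb) acc := by
          apply PySem.List.foldl_congr_mem
          intro a j _
          rw [show (fun r => r.set (j + sc).toNat
                (PySem.List.pyGetD (PySem.List.pyGetD board i []) j "-"))
              = (fun r0 : List String => r0.modify (j + sc).toNat
                (fun _ => PySem.List.pyGetD (PySem.List.pyGetD board i []) j "-")) from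
            funext (fun r0 => List.set_eq_modify _ _ _)]
          exact if_congr (by tauto) rfl rfl
      _ = _ := pv_hoist (0 ≤ i + sr ∧ i + sr < sz) (i + sr).toNat
            (fun j => 0 ≤ j + sc ∧ j + sc < sz)
            (fun j => fun r0 : List String => r0.modify (j + sc).toNat
              (fun _ => PySem.List.pyGetD (PySem.List.pyGetD board i []) j "-"))
            (PySem.List.pyRange 0 sz 1) acc
  rw [h1]
  subst hsz
  apply List.ext_getElem?
  intro r
  rw [pv_foldl_gmod_get sr (board.length : Int) _ _ (PySem.List.nodup_pyRange_one 0 _)]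
  by_cases hr : r < board.length
  · rw [PySem.List.getElem?_map_pyRange_zero _ board.length r hr]
    by_cases hrr : 0 ≤ (r : Int) - sr ∧ (r : Int) - sr < (board.length : Int)
    · rw [if_pos ⟨by rw [PySem.List.mem_pyRange_one]; omega, by omega⟩]
      rw [List.getElem?_replicate, if_pos (by omega), Option.map_some]
      rw [if_pos hrr]
      congr 1
      have hbg : PySem.List.pyGetD board ((r : Int) - sr) []
          = board.getD ((r : Int) - sr).toNat [] := by
        rw [PySem.List.pyGetD_eq_getElem board [] (by omega) (by omega)]
        exact (List.getD_eq_getElem board [] (by omega)).symm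
      refine pv_row_eq (board.length : Int) sc (by omega)
        (PySem.List.pyGetD board ((r : Int) - sr) []) ?_
      rw [hbg]
      exact hlen ((r : Int) - sr).toNat (by rw [List.mem_range]; omega)
        ⟨by omega, by omega⟩
    · rw [if_neg (by rw [PySem.List.mem_pyRange_one]; exact fun h => hrr h.1)]
      rw [List.getElem?_replicate, if_pos (by omega), if_neg hrr]
  · rw [if_neg (fun h => absurd h.2 (by omega))]
    rw [List.getElem?_eq_none (by rw [List.length_replicate]; omega),
      List.getElem?_eq_none
        (by rw [List.length_map, PySem.List.length_pyRange_one]; omega)]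

-- ===== VERDICT (by name: the statement is the Claim_ definition above) =====
theorem shift_board_spec : Claim_equal_shift_board := by
  intro board row col margin _ hpre
  unfold Spec_shift_board
  simp only [shift_board, shift_board_alt]
  by_cases h0 : pvShift row (board.length : Int) margin = 0 ∧
      pvShift col (board.length : Int) margin = 0
  · rw [if_pos h0, if_pos h0]
  · rw [if_neg h0, if_neg h0]
    have hlen : ∀ i ∈ List.range board.length,
        (0 ≤ (i : Int) + pvShift row (board.length : Int) margin ∧
          (i : Int) + pvShift row (board.length : Int) margin < (board.length : Int)) →
          (if 0 ≤ pvShift col (board.length : Int) margin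
           then (board.length : Int) - pvShift col (board.length : Int) margin
           else if -pvShift col (board.length : Int) margin < (board.length : Int)
             then (board.length : Int) else 0) ≤ ((board.getD i []).length : Int) := by
      unfold Pre_shift_board at hpre
      exact hpre.resolve_left h0
    congr 1
    exact pv_board_eq board (pvShift row (board.length : Int) margin)
      (pvShift col (board.length : Int) margin) (board.length : Int) rfl hlen
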